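-- pv_equiv track=rewrite | github.com/gitwalter/ai-dev-agent | utils/git/workflow_enforcer.py | _determine_scope
-- ===== SOURCE A (Python) =====
-- from typing import Dict, List, Optional, Tuple
--
-- def _determine_scope(categories: Dict[str, List[str]]) -> Optional[str]:
--     """Determine scope based on file patterns."""
--
--     all_files = []
--     for file_list in categories.values():
--         all_files.extend(file_list)
--
--     # Common scope patterns
--     if any('agile' in f.lower() for f in all_files):
--         return "agile"
--     elif any('test' in f.lower() for f in all_files):
--         return "tests"
--     elif any('doc' in f.lower() for f in all_files):
--         return "docs"
--     elif any('api' in f.lower() for f in all_files):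
--         return "api"
--     elif any('ui' in f.lower() or 'interface' in f.lower() for f in all_files):
--         return "ui"
--     elif any('config' in f.lower() for f in all_files):
--         return "config"
--
--     return None
-- ===== SOURCE B (Python) =====
-- def _determine_scope(categories):
--     """Determine scope based on file patterns."""
--     matched = set()
--     for file_list in categories.values():
--         for f in file_list:
--             g = f.lower()
--             if 'agile' in g:
--                 matched.add('agile')
--             if 'test' in g:
--                 matched.add('tests')
--             if 'doc' in g:
--                 matched.add('docs')
--             if 'api' in g:
--                 matched.add('api')
--             if 'ui' in g or 'interface' in g:
--                 matched.add('ui')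
--             if 'config' in g:
--                 matched.add('config')
--     for scope in ('agile', 'tests', 'docs', 'api', 'ui', 'config'):
--         if scope in matched:
--             return scope
--     return None
-- ===== Notes on version B (the rewrite author's own statement) =====
-- stated objective: faster
-- what changed: Replaces six separate any()-scans over the flattened file list (each lowercasing every file again) by a single pass over the files that lowercases each file once and records every matching scope in a set, followed by a fixed priority-list lookup.
import Mathlib
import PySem

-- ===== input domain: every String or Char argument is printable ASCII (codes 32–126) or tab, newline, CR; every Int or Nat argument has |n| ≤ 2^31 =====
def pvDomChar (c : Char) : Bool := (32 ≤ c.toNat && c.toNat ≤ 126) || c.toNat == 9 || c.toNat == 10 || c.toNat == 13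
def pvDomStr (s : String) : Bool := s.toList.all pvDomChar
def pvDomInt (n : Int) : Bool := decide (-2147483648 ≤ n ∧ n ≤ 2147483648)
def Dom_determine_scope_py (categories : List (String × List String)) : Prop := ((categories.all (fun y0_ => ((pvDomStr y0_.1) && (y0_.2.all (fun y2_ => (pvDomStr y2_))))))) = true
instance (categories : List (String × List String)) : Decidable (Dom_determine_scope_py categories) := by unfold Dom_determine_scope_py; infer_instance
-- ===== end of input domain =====

-- B replaces A's six repeated any()-scans of the flattened file list by one pass that
-- lowercases each file once and collects matched scopes in a set, then a priority lookup.

-- ===== PORT A =====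
def determine_scope_py (categories : List (String × List String)) : Option String :=
  let all_files := categories.foldl (fun acc p => acc ++ p.2) []
  if all_files.any (fun f => PySem.Str.isIn "agile" (PySem.Str.lower f)) then some "agile"
  else if all_files.any (fun f => PySem.Str.isIn "test" (PySem.Str.lower f)) then some "tests"
  else if all_files.any (fun f => PySem.Str.isIn "doc" (PySem.Str.lower f)) then some "docs"
  else if all_files.any (fun f => PySem.Str.isIn "api" (PySem.Str.lower f)) then some "api"
  else if all_files.any (fun f => PySem.Str.isIn "ui" (PySem.Str.lower f) || PySem.Str.isIn "interface" (PySem.Str.lower f)) then some "ui"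
  else if all_files.any (fun f => PySem.Str.isIn "config" (PySem.Str.lower f)) then some "config"
  else none

-- ===== PORT B =====
-- the body of B's inner loop: lowercase once, add every matching scope to the set
def pvStep (acc : PySem.Set String) (f : String) : PySem.Set String :=
  let g := PySem.Str.lower f
  let acc := if PySem.Str.isIn "agile" g then PySem.Set.add acc "agile" else acc
  let acc := if PySem.Str.isIn "test" g then PySem.Set.add acc "tests" else acc
  let acc := if PySem.Str.isIn "doc" g then PySem.Set.add acc "docs" else acc
  let acc := if PySem.Str.isIn "api" g then PySem.Set.add acc "api" else acc
  let acc := if PySem.Str.isIn "ui" g || PySem.Str.isIn "interface" g then PySem.Set.add acc "ui" else acc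
  if PySem.Str.isIn "config" g then PySem.Set.add acc "config" else acc

def determine_scope_py_alt (categories : List (String × List String)) : Option String :=
  let matched : PySem.Set String :=
    categories.foldl (fun acc p => p.2.foldl pvStep acc) PySem.Set.empty
  ["agile", "tests", "docs", "api", "ui", "config"].find?
    (fun s => PySem.Set.contains matched s)

-- ===== PRECONDITION & SPEC =====
def Spec_determine_scope_py (categories : List (String × List String)) (out : Option String) : Prop := out = determine_scope_py_alt categories
instance (categories : List (String × List String)) (out : Option String) : Decidable (Spec_determine_scope_py categories out) := by unfold Spec_determine_scope_py; infer_instance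

-- ===== CLAIM (what is proved, stated in full; the proofs are below) =====
def Claim_equal_determine_scope_py : Prop := ∀ (categories : List (String × List String)), Dom_determine_scope_py categories → Spec_determine_scope_py categories (determine_scope_py categories)

-- ===== LEMMAS AND PROOFS =====

-- per-scope per-file condition (proof helper)
def pvCond (s f : String) : Bool :=
  let g := PySem.Str.lower f
  if s == "agile" then PySem.Str.isIn "agile" g
  else if s == "tests" then PySem.Str.isIn "test" g
  else if s == "docs" then PySem.Str.isIn "doc" g
  else if s == "api" then PySem.Str.isIn "api" g
  else if s == "ui" then PySem.Str.isIn "ui" g || PySem.Str.isIn "interface" g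
  else PySem.Str.isIn "config" g

def pvScopes : List String := ["agile", "tests", "docs", "api", "ui", "config"]

theorem pvMem_ite (s t : String) (P : Prop) [Decidable P] (acc : PySem.Set String) :
    s ∈ (if P then PySem.Set.add acc t else acc) ↔ s ∈ acc ∨ (P ∧ s = t) := by
  split_ifs with h <;> simp [PySem.Set.mem_add, h]

theorem pvMem_step (s : String) (hs : s ∈ pvScopes) (acc : PySem.Set String) (f : String) :
    s ∈ pvStep acc f ↔ s ∈ acc ∨ pvCond s f = true := by
  fin_cases hs <;> simp [pvStep, pvCond, pvMem_ite]

theorem pvMem_foldl (s : String) (hs : s ∈ pvScopes) (files : List String) (acc : PySem.Set String) :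
    s ∈ files.foldl pvStep acc ↔ s ∈ acc ∨ files.any (pvCond s) := by
  induction files generalizing acc with
  | nil => simp
  | cons f rest ih =>
      simp only [List.foldl_cons, List.any_cons, ih, pvMem_step s hs]
      constructor
      · rintro ((h | h) | h) <;> simp_all
      · rintro (h | h)
        · exact Or.inl (Or.inl h)
        · rcases (by simpa using h : pvCond s f = true ∨ rest.any (pvCond s) = true) with h | h
          · exact Or.inl (Or.inr h)
          · exact Or.inr h

theorem pvMem_matched (s : String) (hs : s ∈ pvScopes) (categories : List (String × List String))
    (acc : PySem.Set String) :
    s ∈ categories.foldl (fun acc p => p.2.foldl pvStep acc) acc ↔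
      s ∈ acc ∨ categories.any (fun p => p.2.any (pvCond s)) := by
  induction categories generalizing acc with
  | nil => simp
  | cons c rest ih =>
      simp only [List.foldl_cons, List.any_cons, ih, pvMem_foldl s hs]
      constructor
      · rintro ((h | h) | h) <;> simp_all
      · rintro (h | h)
        · exact Or.inl (Or.inl h)
        · rcases (by simpa using h :
            c.2.any (pvCond s) = true ∨ rest.any (fun p => p.2.any (pvCond s)) = true) with h | h
          · exact Or.inl (Or.inr h)
          · exact Or.inr h

theorem pvAny_flatten (categories : List (String × List String)) (c : String → Bool)
    (init : List String) :
    (categories.foldl (fun acc p => acc ++ p.2) init).any c =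
      (init.any c || categories.any (fun p => p.2.any c)) := by
  induction categories generalizing init with
  | nil => simp
  | cons x rest ih =>
      simp [List.foldl_cons, List.any_append, Function.comp_def]

theorem pvCond_eq :
    (pvCond "agile" = fun f => PySem.Str.isIn "agile" (PySem.Str.lower f)) ∧
    (pvCond "tests" = fun f => PySem.Str.isIn "test" (PySem.Str.lower f)) ∧
    (pvCond "docs" = fun f => PySem.Str.isIn "doc" (PySem.Str.lower f)) ∧
    (pvCond "api" = fun f => PySem.Str.isIn "api" (PySem.Str.lower f)) ∧
    (pvCond "ui" = fun f => PySem.Str.isIn "ui" (PySem.Str.lower f) || PySem.Str.isIn "interface" (PySem.Str.lower f)) ∧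
    (pvCond "config" = fun f => PySem.Str.isIn "config" (PySem.Str.lower f)) := by
  refine ⟨?_, ?_, ?_, ?_, ?_, ?_⟩ <;> (funext f; simp [pvCond])

theorem pvContains_matched (s : String) (hs : s ∈ pvScopes) (categories : List (String × List String)) :
    PySem.Set.contains (categories.foldl (fun acc p => p.2.foldl pvStep acc) PySem.Set.empty) s =
      categories.any (fun p => p.2.any (pvCond s)) := by
  rw [Bool.eq_iff_iff, PySem.Set.contains_iff, pvMem_matched s hs categories PySem.Set.empty]
  simp [PySem.Set.empty]

-- ===== VERDICT (by name: the statement is the Claim_ definition above) =====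
theorem determine_scope_py_spec : Claim_equal_determine_scope_py := by
  intro categories _
  show determine_scope_py categories = determine_scope_py_alt categories
  unfold determine_scope_py determine_scope_py_alt
  simp only [List.find?, pvContains_matched "agile" (by decide),
    pvContains_matched "tests" (by decide), pvContains_matched "docs" (by decide),
    pvContains_matched "api" (by decide), pvContains_matched "ui" (by decide),
    pvContains_matched "config" (by decide), pvAny_flatten, List.any_nil, Bool.false_or]
  simp only [pvCond_eq]
  generalize (categories.any fun p => p.2.any fun f => PySem.Str.isIn "agile" (PySem.Str.lower f)) = b1
  generalize (categories.any fun p => p.2.any fun f => PySem.Str.isIn "test" (PySem.Str.lower f)) = b2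
  generalize (categories.any fun p => p.2.any fun f => PySem.Str.isIn "doc" (PySem.Str.lower f)) = b3
  generalize (categories.any fun p => p.2.any fun f => PySem.Str.isIn "api" (PySem.Str.lower f)) = b4
  generalize (categories.any fun p => p.2.any fun f => PySem.Str.isIn "ui" (PySem.Str.lower f) || PySem.Str.isIn "interface" (PySem.Str.lower f)) = b5
  generalize (categories.any fun p => p.2.any fun f => PySem.Str.isIn "config" (PySem.Str.lower f)) = b6
  cases b1 <;> cases b2 <;> cases b3 <;> cases b4 <;> cases b5 <;> cases b6 <;> rfl
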